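-- pv_equiv track=rewrite | github.com/Evan4452/HalterAPI-ROUGH | short.py | calculate_overall_bias
-- ===== SOURCE A (Python) =====
-- def calculate_overall_bias(biases):
--     bull_count = sum(1 for bias in biases.values() if bias == "Bullish")
--     bear_count = sum(1 for bias in biases.values() if bias == "Bearish")
--
--     if bull_count > bear_count:
--         return "Bullish"
--     elif bear_count > bull_count:
--         return "Bearish"
--     return "Neutral"
-- ===== SOURCE B (Python) =====
-- def calculate_overall_bias(biases):
--     # Single pass maintaining only the signed net sentiment (bull minus bear);
--     # the sign of the score decides the label.
--     score = 0
--     for bias in biases.values():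
--         if bias == "Bullish":
--             score += 1
--         elif bias == "Bearish":
--             score -= 1
--     if score > 0:
--         return "Bullish"
--     if score < 0:
--         return "Bearish"
--     return "Neutral"
-- ===== Notes on version B (the rewrite author's own statement) =====
-- stated objective: alternative
-- what changed: Replaces A's two separate counts compared at the end with a single pass that maintains one signed running score (+1 per Bullish, -1 per Bearish) and decides by the sign of that score, never computing either count.
import Mathlib
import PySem

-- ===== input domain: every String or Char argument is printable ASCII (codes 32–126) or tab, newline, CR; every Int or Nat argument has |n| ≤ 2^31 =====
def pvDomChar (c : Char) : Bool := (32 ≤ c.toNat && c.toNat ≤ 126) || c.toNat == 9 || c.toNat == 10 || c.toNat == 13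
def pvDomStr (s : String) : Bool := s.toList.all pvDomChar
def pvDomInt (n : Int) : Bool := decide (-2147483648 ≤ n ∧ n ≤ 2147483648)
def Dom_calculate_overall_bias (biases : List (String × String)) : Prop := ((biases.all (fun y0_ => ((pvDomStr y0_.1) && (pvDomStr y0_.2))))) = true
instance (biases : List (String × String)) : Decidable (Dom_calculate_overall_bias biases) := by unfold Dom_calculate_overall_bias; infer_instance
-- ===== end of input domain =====

-- B replaces A's two counts with one single-pass signed score (+1/-1) whose sign decides; alternative decomposition, same O(n) cost.


-- ===== PORT A =====
-- sum(1 for bias in biases.values() if bias == "Bullish") as a fold over the values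
def calculate_overall_bias (biases : List (String × String)) : String :=
  let vals := biases.map Prod.snd
  let bull_count : Int := vals.foldl (fun acc bias => if bias = "Bullish" then acc + 1 else acc) 0
  let bear_count : Int := vals.foldl (fun acc bias => if bias = "Bearish" then acc + 1 else acc) 0
  if bull_count > bear_count then "Bullish"
  else if bear_count > bull_count then "Bearish"
  else "Neutral"

-- ===== PORT B =====
-- single pass: signed running score, sign decides
def calculate_overall_bias_alt (biases : List (String × String)) : String :=
  let score : Int := (biases.map Prod.snd).foldl
    (fun score bias => if bias = "Bullish" then score + 1
                       else if bias = "Bearish" then score - 1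
                       else score) 0
  if score > 0 then "Bullish"
  else if score < 0 then "Bearish"
  else "Neutral"

-- ===== PRECONDITION & SPEC =====
def Spec_calculate_overall_bias (biases : List (String × String)) (out : String) : Prop := out = calculate_overall_bias_alt biases
instance (biases : List (String × String)) (out : String) : Decidable (Spec_calculate_overall_bias biases out) := by unfold Spec_calculate_overall_bias; infer_instance

-- ===== CLAIM (what is proved, stated in full; the proofs are below) =====
def Claim_equal_calculate_overall_bias : Prop := ∀ (biases : List (String × String)), Dom_calculate_overall_bias biases → Spec_calculate_overall_bias biases (calculate_overall_bias biases)

-- ===== LEMMAS AND PROOFS =====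
-- A's conditional-sum fold counts the occurrences of v
theorem foldl_if_count (v : String) (xs : List String) (n : Int) :
    xs.foldl (fun acc bias => if bias = v then acc + 1 else acc) n = n + xs.count v := by
  induction xs generalizing n with
  | nil => simp
  | cons x xs ih =>
    simp only [List.foldl_cons, List.count_cons, ih]
    by_cases h : x = v <;> simp [h] <;> ring

-- B's score fold is the count of "Bullish" minus the count of "Bearish"
theorem foldl_score_eq (xs : List String) (n : Int) :
    xs.foldl (fun score bias => if bias = "Bullish" then score + 1
                                else if bias = "Bearish" then score - 1
                                else score) n
        = n + xs.count "Bullish" - xs.count "Bearish" := by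
  induction xs generalizing n with
  | nil => simp
  | cons x xs ih =>
    simp only [List.foldl_cons, List.count_cons, ih]
    by_cases h1 : x = "Bullish"
    · simp [h1]; ring
    · by_cases h2 : x = "Bearish" <;> simp [h1, h2] <;> ring

-- ===== VERDICT (by name: the statement is the Claim_ definition above) =====
theorem calculate_overall_bias_spec : Claim_equal_calculate_overall_bias := by
  intro biases _
  unfold Spec_calculate_overall_bias calculate_overall_bias calculate_overall_bias_alt
  simp only [foldl_if_count, foldl_score_eq, Int.zero_add]
  set bull := ((biases.map Prod.snd).count "Bullish" : Int)
  set bear := ((biases.map Prod.snd).count "Bearish" : Int)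
  split_ifs with h1 h2 h3 h4 h5 h6 h7 <;> try rfl
  all_goals omega
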